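-- pv_equiv track=rewrite | github.com/olliemath/AdventOfCode | 2022/day_16/solution.py | best_possible_score_2x
-- ===== SOURCE A (Python) =====
-- def best_possible_score_2x(values, time1, time2):
--     # Return the best possible score from these values
--     # (as if travel time to every node was 1)
--     total = 0
--     values = sorted(values, reverse=True)
--     for k in range(len(values)):
--         if time1 >= time2:
--             time1 -= 2
--             if time1 >= 0:
--                 total += time1 * values[k]
--         else:
--             time2 -= 2
--             if time2 >= 0:
--                 total += time2 * values[k]
--
--         if time1 <= 2 and time2 <= 2:
--             break
--
--     return total
-- ===== SOURCE B (Python) =====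
-- def best_possible_score_2x(values, time1, time2):
--     # Merged-slot formulation: pair the sorted values with the merged descending
--     # list of positive remaining-time slots from the two budgets.
--     vals = sorted(values, reverse=True)
--     n = len(vals)
--     slots = []
--     for t in (time1, time2):
--         s = t - 2
--         count = 0
--         while s > 0 and count < n:
--             slots.append(s)
--             s -= 2
--             count += 1
--     slots.sort(reverse=True)
--     return sum(v * s for v, s in zip(vals, slots))
-- ===== Notes on version B (the rewrite author's own statement) =====
-- stated objective: alternative
-- what changed: Replaces A's stateful interleaved greedy (pick the larger remaining budget, decrement, early break) with a declarative slot-table construction: generate each budget's descending positive slot sequence (capped at len(values)), merge-sort all slots descending, and sum value*slot over zip with the sorted values.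
import Mathlib
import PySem

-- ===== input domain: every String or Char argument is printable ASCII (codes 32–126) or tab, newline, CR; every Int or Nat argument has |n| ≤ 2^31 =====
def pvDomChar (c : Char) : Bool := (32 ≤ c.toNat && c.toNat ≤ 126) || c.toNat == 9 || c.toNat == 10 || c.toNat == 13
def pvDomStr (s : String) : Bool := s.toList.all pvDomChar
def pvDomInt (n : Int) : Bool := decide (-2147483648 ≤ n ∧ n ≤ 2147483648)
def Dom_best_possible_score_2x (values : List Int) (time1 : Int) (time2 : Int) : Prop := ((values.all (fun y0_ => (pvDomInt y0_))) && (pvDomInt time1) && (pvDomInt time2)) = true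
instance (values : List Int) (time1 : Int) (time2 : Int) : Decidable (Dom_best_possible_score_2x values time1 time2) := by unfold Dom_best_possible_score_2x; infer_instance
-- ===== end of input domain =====

-- B replaces A's interleaved pick-the-larger-budget greedy by an explicit merged table of positive
-- time slots paired against the sorted values ("alternative": same O(n log n) cost, different algorithm).

-- ===== PORT A =====
-- the 'for k in range(len(values))' loop: iteration k reads values[k], so the loop walks the
-- sorted list front to back; 'break' ends the recursion, falling off the range returns total.
def pvALoop : List Int → Int → Int → Int → Int
  | [], _t1, _t2, total => total
  | v :: rest, t1, t2, total =>
    if t1 ≥ t2 then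
      let t1' := t1 - 2
      let total' := if t1' ≥ 0 then total + t1' * v else total
      if t1' ≤ 2 ∧ t2 ≤ 2 then total' else pvALoop rest t1' t2 total'
    else
      let t2' := t2 - 2
      let total' := if t2' ≥ 0 then total + t2' * v else total
      if t1 ≤ 2 ∧ t2' ≤ 2 then total' else pvALoop rest t1 t2' total'

def best_possible_score_2x (values : List Int) (time1 : Int) (time2 : Int) : Int :=
  pvALoop (PySem.List.sorted values (fun x => x) true) time1 time2 0

-- ===== PORT B =====
-- Source B's inner while loop: 's' starts at t - 2, appends while s > 0 and fewer than 'cap' slots taken.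
def pvGenSlots : Int → Nat → List Int
  | _s, 0 => []
  | s, cap + 1 => if s > 0 then s :: pvGenSlots (s - 2) cap else []

def best_possible_score_2x_alt (values : List Int) (time1 : Int) (time2 : Int) : Int :=
  let vals := PySem.List.sorted values (fun x => x) true
  let n := vals.length
  let slots := pvGenSlots (time1 - 2) n ++ pvGenSlots (time2 - 2) n
  let slotsSorted := PySem.List.sorted slots (fun x => x) true
  (List.zipWith (· * ·) vals slotsSorted).sum

-- ===== PRECONDITION & SPEC =====
def Spec_best_possible_score_2x (values : List Int) (time1 : Int) (time2 : Int) (out : Int) : Prop := out = best_possible_score_2x_alt values time1 time2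
instance (values : List Int) (time1 : Int) (time2 : Int) (out : Int) : Decidable (Spec_best_possible_score_2x values time1 time2 out) := by unfold Spec_best_possible_score_2x; infer_instance

-- ===== CLAIM (what is proved, stated in full; the proofs are below) =====
def Claim_equal_best_possible_score_2x : Prop := ∀ (values : List Int) (time1 : Int) (time2 : Int), Dom_best_possible_score_2x values time1 time2 → Spec_best_possible_score_2x values time1 time2 (best_possible_score_2x values time1 time2)

-- ===== LEMMAS AND PROOFS =====

-- the sequence of remaining-time slots A's greedy consumes, n steps of pick-the-larger-budget
def pvGSlots : Nat → Int → Int → List Int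
  | 0, _, _ => []
  | n + 1, t1, t2 =>
    if t1 ≥ t2 then (t1 - 2) :: pvGSlots n (t1 - 2) t2 else (t2 - 2) :: pvGSlots n t1 (t2 - 2)

def pvDesc : Int → Int → Bool := fun a b => decide (a ≥ b)

lemma pvGSlots_le (n : Nat) : ∀ (t1 t2 : Int), ∀ x ∈ pvGSlots n t1 t2, x ≤ max t1 t2 - 2 := by
  induction n with
  | zero => intro t1 t2 x hx; simp [pvGSlots] at hx
  | succ n ih =>
    intro t1 t2 x hx
    simp only [pvGSlots] at hx
    split at hx <;> rename_i h <;> rcases List.mem_cons.1 hx with rfl | hx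
    · omega
    · have := ih (t1 - 2) t2 x hx; omega
    · omega
    · have := ih t1 (t2 - 2) x hx; omega

lemma pvGSlots_pairwise (n : Nat) : ∀ (t1 t2 : Int), (pvGSlots n t1 t2).Pairwise (· ≥ ·) := by
  induction n with
  | zero => intro t1 t2; simp [pvGSlots]
  | succ n ih =>
    intro t1 t2
    simp only [pvGSlots]
    split <;> rename_i h <;> refine List.pairwise_cons.2 ⟨?_, by apply ih⟩
    · intro x hx; have := pvGSlots_le n (t1 - 2) t2 x hx; omega
    · intro x hx; have := pvGSlots_le n t1 (t2 - 2) x hx; omega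

-- A's conditional accumulation, as a sum over value/slot pairs
def pvGuardSum (vs slots : List Int) : Int :=
  (List.zipWith (fun v s => if s ≥ 0 then v * s else 0) vs slots).sum

lemma pvGuardSum_nonpos (vs : List Int) : ∀ slots, (∀ s ∈ slots, s ≤ 0) → pvGuardSum vs slots = 0 := by
  induction vs with
  | nil => intro slots _; simp [pvGuardSum]
  | cons v vs ih =>
    intro slots hle
    cases slots with
    | nil => simp [pvGuardSum]
    | cons s rest =>
      have hs : s ≤ 0 := hle s (by simp)
      have hterm : (if s ≥ 0 then v * s else 0) = 0 := by
        split <;> rename_i h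
        · have : s = 0 := le_antisymm hs h
          simp [this]
        · rfl
      have := ih rest (fun x hx => hle x (by simp [hx]))
      simpa [pvGuardSum, hterm] using this

lemma pvGuardSum_gSlots_zero (n : Nat) : ∀ (t1 t2 : Int) (vs : List Int), t1 ≤ 2 → t2 ≤ 2 →
    pvGuardSum vs (pvGSlots n t1 t2) = 0 := by
  intro t1 t2 vs h1 h2
  apply pvGuardSum_nonpos
  intro s hs
  have := pvGSlots_le n t1 t2 s hs
  omega

-- characterisation of A's loop: it accumulates the guarded sum over the greedy slot sequence
lemma pvALoop_eq (vs : List Int) : ∀ (t1 t2 total : Int),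
    pvALoop vs t1 t2 total = total + pvGuardSum vs (pvGSlots vs.length t1 t2) := by
  induction vs with
  | nil => intro t1 t2 total; simp [pvALoop, pvGSlots, pvGuardSum]
  | cons v vs ih =>
    intro t1 t2 total
    simp only [pvALoop, List.length_cons, pvGSlots]
    by_cases h : t1 ≥ t2
    · simp only [if_pos h]
      have hsum : pvGuardSum (v :: vs) ((t1 - 2) :: pvGSlots vs.length (t1 - 2) t2)
          = (if t1 - 2 ≥ 0 then v * (t1 - 2) else 0) + pvGuardSum vs (pvGSlots vs.length (t1 - 2) t2) := by
        simp [pvGuardSum]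
      by_cases hb : t1 - 2 ≤ 2 ∧ t2 ≤ 2
      · rw [if_pos hb, hsum, pvGuardSum_gSlots_zero vs.length (t1 - 2) t2 vs hb.1 hb.2]
        split <;> ring
      · rw [if_neg hb, hsum, ih (t1 - 2) t2]
        split <;> ring
    · simp only [if_neg h]
      have hsum : pvGuardSum (v :: vs) ((t2 - 2) :: pvGSlots vs.length t1 (t2 - 2))
          = (if t2 - 2 ≥ 0 then v * (t2 - 2) else 0) + pvGuardSum vs (pvGSlots vs.length t1 (t2 - 2)) := by
        simp [pvGuardSum]
      by_cases hb : t1 ≤ 2 ∧ t2 - 2 ≤ 2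
      · rw [if_pos hb, hsum, pvGuardSum_gSlots_zero vs.length t1 (t2 - 2) vs hb.1 hb.2]
        split <;> ring
      · rw [if_neg hb, hsum, ih t1 (t2 - 2)]
        split <;> ring

-- on a descending slot list, the guarded sum is the plain product sum over the positive prefix
lemma pvGuardSum_takeWhile : ∀ (slots vs : List Int), slots.Pairwise (· ≥ ·) →
    pvGuardSum vs slots = (List.zipWith (· * ·) vs (slots.takeWhile (fun s => decide (0 < s)))).sum := by
  intro slots
  induction slots with
  | nil => intro vs _; simp [pvGuardSum]
  | cons s rest ih =>
    intro vs hp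
    rcases List.pairwise_cons.1 hp with ⟨hhead, htail⟩
    cases vs with
    | nil => simp [pvGuardSum]
    | cons v vs' =>
      by_cases hs : 0 < s
      · have : (if s ≥ 0 then v * s else 0) = v * s := by rw [if_pos (le_of_lt hs)]
        simp only [List.takeWhile_cons, decide_eq_true hs, if_pos]
        simp [pvGuardSum, this] at ih ⊢
        exact ih vs' htail
      · have hz : ∀ x ∈ s :: rest, x ≤ 0 := by
          intro x hx
          rcases List.mem_cons.1 hx with rfl | hx
          · omega
          · have := hhead x hx; omega
        rw [pvGuardSum_nonpos _ _ hz]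
        simp [hs]

lemma pvGenSlots_le (cap : Nat) : ∀ (s : Int), ∀ x ∈ pvGenSlots s cap, x ≤ s := by
  induction cap with
  | zero => intro s x hx; simp [pvGenSlots] at hx
  | succ cap ih =>
    intro s x hx
    simp only [pvGenSlots] at hx
    split at hx
    · rcases List.mem_cons.1 hx with rfl | hx
      · omega
      · have := ih (s - 2) x hx; omega
    · simp at hx

lemma pvGenSlots_pairwise (cap : Nat) : ∀ (s : Int), (pvGenSlots s cap).Pairwise (· ≥ ·) := by
  induction cap with
  | zero => intro s; simp [pvGenSlots]
  | succ cap ih =>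
    intro s
    simp only [pvGenSlots]
    split
    · refine List.pairwise_cons.2 ⟨?_, ih (s - 2)⟩
      intro x hx; have := pvGenSlots_le cap (s - 2) x hx; omega
    · simp

lemma pvGenSlots_eq_nil (cap : Nat) (s : Int) (hs : ¬ s > 0) : pvGenSlots s cap = [] := by
  cases cap with
  | zero => rfl
  | succ c => simp only [pvGenSlots, if_neg hs]

lemma pvGenSlots_cons (cap : Nat) (s : Int) (hs : s > 0) :
    pvGenSlots s (cap + 1) = s :: pvGenSlots (s - 2) cap := by
  simp only [pvGenSlots, if_pos hs]

-- the crux: the first n merged slots (each budget capped at ≥ n) are exactly the positive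
-- prefix of A's greedy slot sequence
lemma pvMerge_take (n : Nat) : ∀ (a b : Nat) (t1 t2 : Int), n ≤ a → n ≤ b →
    ((pvGenSlots (t1 - 2) a).merge (pvGenSlots (t2 - 2) b) pvDesc).take n
      = (pvGSlots n t1 t2).takeWhile (fun s => decide (0 < s)) := by
  induction n with
  | zero => intro a b t1 t2 _ _; simp [pvGSlots]
  | succ n ih =>
    intro a b t1 t2 ha hb
    obtain ⟨a', rfl⟩ : ∃ a', a = a' + 1 := ⟨a - 1, by omega⟩
    obtain ⟨b', rfl⟩ : ∃ b', b = b' + 1 := ⟨b - 1, by omega⟩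
    have ha' : n ≤ a' := by omega
    have hb' : n ≤ b' := by omega
    by_cases h : t1 ≥ t2
    · simp only [pvGSlots, if_pos h]
      by_cases h1 : t1 - 2 > 0
      · rw [List.takeWhile_cons, decide_eq_true h1]
        by_cases h2 : t2 - 2 > 0
        · have hle : pvDesc (t1 - 2) (t2 - 2) = true := by
            simp only [pvDesc, decide_eq_true_iff]; omega
          rw [pvGenSlots_cons a' _ h1, pvGenSlots_cons b' _ h2, List.cons_merge_cons, hle,
            if_pos rfl, List.take_succ_cons, ← pvGenSlots_cons b' _ h2,
            ih a' (b' + 1) (t1 - 2) t2 ha' (by omega)]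
          simp
        · rw [pvGenSlots_eq_nil (b' + 1) _ h2, List.merge_right, pvGenSlots_cons a' _ h1,
            List.take_succ_cons]
          have := ih a' b' (t1 - 2) t2 ha' hb'
          rw [pvGenSlots_eq_nil b' _ h2, List.merge_right] at this
          rw [this]; simp
      · -- t1 - 2 ≤ 0, and t2 ≤ t1 so t2 - 2 ≤ 0 too: no slots at all
        have h2 : ¬ t2 - 2 > 0 := by omega
        rw [pvGenSlots_eq_nil (a' + 1) _ h1, pvGenSlots_eq_nil (b' + 1) _ h2, List.merge_right,
          List.take_nil, List.takeWhile_cons, decide_eq_false h1]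
        simp
    · simp only [pvGSlots, if_neg h]
      by_cases h2 : t2 - 2 > 0
      · rw [List.takeWhile_cons, decide_eq_true h2]
        by_cases h1 : t1 - 2 > 0
        · have hle : pvDesc (t1 - 2) (t2 - 2) = false := by
            simp only [pvDesc, decide_eq_false_iff_not]; omega
          rw [pvGenSlots_cons a' _ h1, pvGenSlots_cons b' _ h2, List.cons_merge_cons, hle]
          rw [if_neg (by simp), List.take_succ_cons, ← pvGenSlots_cons a' _ h1,
            ih (a' + 1) b' t1 (t2 - 2) (by omega) hb']
          simp
        · rw [pvGenSlots_eq_nil (a' + 1) _ h1, List.nil_merge, pvGenSlots_cons b' _ h2,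
            List.take_succ_cons]
          have := ih a' b' t1 (t2 - 2) ha' hb'
          rw [pvGenSlots_eq_nil a' _ h1, List.nil_merge] at this
          rw [this]; simp
      · have h1 : ¬ t1 - 2 > 0 := by omega
        rw [pvGenSlots_eq_nil (a' + 1) _ h1, pvGenSlots_eq_nil (b' + 1) _ h2, List.merge_right,
          List.take_nil, List.takeWhile_cons, decide_eq_false h2]
        simp

-- zipWith only sees the first |vs| slots
lemma pvZipWith_take (vs : List Int) : ∀ (l : List Int),
    List.zipWith (· * ·) vs l = List.zipWith (· * ·) vs (l.take vs.length) := by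
  induction vs with
  | nil => intro l; simp
  | cons v vs ih =>
    intro l
    cases l with
    | nil => simp
    | cons x l => simp [List.take_succ_cons, ih l]

-- B's post-sort of the concatenated slot lists IS the merge of the two (each already descending)
lemma pvSorted_eq_merge (l1 l2 : List Int) (h1 : l1.Pairwise (· ≥ ·)) (h2 : l2.Pairwise (· ≥ ·)) :
    PySem.List.sorted (l1 ++ l2) (fun x => x) true = l1.merge l2 pvDesc := by
  refine List.Perm.eq_of_pairwise (le := (· ≥ ·))
    (fun a b _ _ hab hba => le_antisymm hba hab) ?_ ?_ ?_
  · exact PySem.List.sorted_pairwise_rev _ _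
  · exact List.Pairwise.merge (r := (· ≥ ·)) h1 h2
  · exact (PySem.List.sorted_perm _ _ _).trans (List.merge_perm_append pvDesc).symm

-- ===== VERDICT (by name: the statement is the Claim_ definition above) =====
theorem best_possible_score_2x_spec : Claim_equal_best_possible_score_2x := by
  intro values time1 time2 _hdom
  unfold Spec_best_possible_score_2x best_possible_score_2x best_possible_score_2x_alt
  show pvALoop (PySem.List.sorted values (fun x => x) true) time1 time2 0 =
      (List.zipWith (· * ·) (PySem.List.sorted values (fun x => x) true)
        (PySem.List.sorted
          (pvGenSlots (time1 - 2) (PySem.List.sorted values (fun x => x) true).length ++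
            pvGenSlots (time2 - 2) (PySem.List.sorted values (fun x => x) true).length)
          (fun x => x) true)).sum
  generalize PySem.List.sorted values (fun x => x) true = vals
  rw [pvALoop_eq vals time1 time2 0, zero_add,
    pvGuardSum_takeWhile _ vals (pvGSlots_pairwise vals.length time1 time2),
    ← pvMerge_take vals.length vals.length vals.length time1 time2 le_rfl le_rfl,
    pvSorted_eq_merge _ _ (pvGenSlots_pairwise vals.length (time1 - 2))
      (pvGenSlots_pairwise vals.length (time2 - 2)),
    ← pvZipWith_take]
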